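-- pv_equiv track=rewrite | github.com/VasiliyMatlab/MessageCoder | python/messcoder.py | comp_enc_size
-- ===== SOURCE A (Python) =====
-- from enum import IntEnum
--
-- class Defines(IntEnum):
--     MESS_CODER_START_B      = 0xAB  # Символ начала посылки (в закодированном потоке)
--     MESS_CODER_END_B        = 0xCD  # Символ конца посылки (в закодированном потоке)
--
--     MESS_CODER_ENC_START    = 0x1E  # Признак начала спец последовательности, после которого идет код спец последовательности (в закодированном потоке)
--     MESS_CODER_ENC_START_B  = 0x01  # Код совпадения с началом посылки (в закодированном потоке)
--     MESS_CODER_ENC_DATA_B   = 0x02  # Код совпадения с началом спец последовательности (в закодированном потоке)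
--     MESS_CODER_ENC_END_B    = 0x03  # Код совпадения с концом посылки (в закодированном потоке)
--
--     MESS_CODER_RC_ERROR	    = -1    # Общая ошибка
--     MESS_CODER_RC_NO_START  = -21   # Символ начала посылки не найден
--     MESS_CODER_RC_NO_END    = -22   # Символ конца посылки не найден
--     MESS_CODER_RC_OVERFLOW  = -23   # Нехватка места в выходном буфере
--     MESS_CODER_RC_DECERR    = -24   # Ошибка декодирования ключевой последовательности
--
-- def comp_enc_size(inp: list[int]) -> int:
--     ostream_size = 2
--     for elem in inp:
--         match elem:
--             case int(Defines.MESS_CODER_START_B) | \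
--                  int(Defines.MESS_CODER_END_B) | \
--                  int(Defines.MESS_CODER_ENC_START):
--                 ostream_size += 2
--             case _:
--                 ostream_size += 1
--     return ostream_size
-- ===== SOURCE B (Python) =====
-- def comp_enc_size(inp: list[int]) -> int:
--     # Staged computation: 2 framing bytes + one byte per element, then three
--     # separate counting passes (list.count) add the extra byte each escaped
--     # special value contributes. No per-element branching.
--     return 2 + len(inp) + inp.count(0xAB) + inp.count(0xCD) + inp.count(0x1E)
-- ===== Notes on version B (the rewrite author's own statement) =====
-- stated objective: faster
-- what changed: Replaces A's single accumulator loop with per-element match branching by a branch-free closed form: 2 + len(inp) plus three independent list.count passes, one per special byte.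
import Mathlib
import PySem

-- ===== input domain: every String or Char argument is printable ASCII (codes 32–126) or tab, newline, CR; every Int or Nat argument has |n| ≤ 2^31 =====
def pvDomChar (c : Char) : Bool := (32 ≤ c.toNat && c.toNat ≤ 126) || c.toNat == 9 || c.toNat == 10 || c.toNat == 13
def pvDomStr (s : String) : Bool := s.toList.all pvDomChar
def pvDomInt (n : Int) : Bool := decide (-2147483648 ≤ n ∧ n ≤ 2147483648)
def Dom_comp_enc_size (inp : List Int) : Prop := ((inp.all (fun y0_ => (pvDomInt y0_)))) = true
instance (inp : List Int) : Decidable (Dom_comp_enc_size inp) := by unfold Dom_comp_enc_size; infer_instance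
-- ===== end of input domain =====

-- B replaces A's branching accumulator loop by 2 + length + three independent count passes; objective: simpler.

-- ===== PORT A =====
-- literal port of A: fold over the list, +2 for the three special bytes, +1 otherwise
def comp_enc_size (inp : List Int) : Int :=
  inp.foldl (fun ostream_size elem =>
    if elem = 0xAB ∨ elem = 0xCD ∨ elem = 0x1E then ostream_size + 2
    else ostream_size + 1) 2

-- ===== PORT B =====
-- port of B: 2 + len(inp) + inp.count(0xAB) + inp.count(0xCD) + inp.count(0x1E)
def comp_enc_size_alt (inp : List Int) : Int :=
  2 + (inp.length : Int) + (PySem.List.count inp 0xAB : Int)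
    + (PySem.List.count inp 0xCD : Int) + (PySem.List.count inp 0x1E : Int)

-- ===== PRECONDITION & SPEC =====
def Spec_comp_enc_size (inp : List Int) (out : Int) : Prop := out = comp_enc_size_alt inp
instance (inp : List Int) (out : Int) : Decidable (Spec_comp_enc_size inp out) := by unfold Spec_comp_enc_size; infer_instance

-- ===== CLAIM =====
def Claim_equal_comp_enc_size : Prop := ∀ (inp : List Int), Dom_comp_enc_size inp → Spec_comp_enc_size inp (comp_enc_size inp)

-- ===== LEMMAS AND PROOFS =====

lemma comp_enc_size_foldl (inp : List Int) (acc : Int) :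
    inp.foldl (fun ostream_size elem =>
      if elem = 0xAB ∨ elem = 0xCD ∨ elem = 0x1E then ostream_size + 2
      else ostream_size + 1) acc
    = acc + (inp.length : Int) + (PySem.List.count inp 0xAB : Int)
      + (PySem.List.count inp 0xCD : Int) + (PySem.List.count inp 0x1E : Int) := by
  induction inp generalizing acc with
  | nil => simp [PySem.List.count]
  | cons x xs ih =>
    simp only [List.foldl_cons, List.length_cons, ih, PySem.List.count, List.count_cons]
    by_cases h : x = 0xAB ∨ x = 0xCD ∨ x = 0x1E
    · rcases h with h | h | h <;> subst h <;> simp <;> ring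
    · push_neg at h
      obtain ⟨h1, h2, h3⟩ := h
      simp [h1, h2, h3]
      ring

-- ===== VERDICT =====
theorem comp_enc_size_spec : Claim_equal_comp_enc_size := by
  intro inp _
  unfold Spec_comp_enc_size comp_enc_size comp_enc_size_alt
  exact comp_enc_size_foldl inp 2
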